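-- pv_equiv track=rewrite | github.com/MrBrantCode/unitest_baseline | mut_generate/mist_train_taco/taco_10018/solution.py | min_changes_to_palindrome_partitions
-- ===== SOURCE A (Python) =====
-- from functools import lru_cache
--
-- def min_changes_to_palindrome_partitions(s: str, k: int) -> int:
--     n = len(s)
--     if n == k:
--         return 0
--
--     @lru_cache(None)
--     def cnt(left, right):
--         if left >= right:
--             return 0
--         return cnt(left + 1, right - 1) + (s[left] != s[right])
--
--     @lru_cache(None)
--     def dp(length, partition):
--         if partition == length:
--             return 0
--         if partition == 1:
--             return cnt(0, length - 1)
--         return min((dp(prelength, partition - 1) + cnt(prelength, length - 1) for prelength in range(partition - 1, length)))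
--
--     return dp(n, k)
-- ===== SOURCE B (Python) =====
-- def min_changes_to_palindrome_partitions(s: str, k: int) -> int:
--     n = len(s)
--     if n == k:
--         return 0
--     # cost[i][j] = changes to make s[i..j] a palindrome; rows built from i = n-1 down to 0
--     cost = []
--     prev_row = [0] * n
--     for i in range(n - 1, -1, -1):
--         row = [0] * (i + 1) + [
--             (s[i] != s[j]) + (prev_row[j - 1] if j > i + 1 else 0)
--             for j in range(i + 1, n)
--         ]
--         cost.insert(0, row)
--         prev_row = row
--     # prev[m - p] = min changes to split s[:m] into p palindrome parts; only prefix lengths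
--     # m <= p + (n - k) can leave room for the remaining k - p nonempty parts, so only those are kept
--     prev = [cost[0][m - 1] for m in range(1, n - k + 2)]
--     for p in range(2, k + 1):
--         prev = [
--             min(prev[t - p + 1] + cost[t][m - 1] for t in range(p - 1, m))
--             for m in range(p, n - k + p + 1)
--         ]
--     return prev[n - k]
-- ===== Notes on version B (the rewrite author's own statement) =====
-- stated objective: faster
-- what changed: Replaced the lru_cache memoized recursion (cnt/dp) by an iterative bottom-up DP: the mismatch-cost table is filled row by row, and the partition DP keeps one rolling array per partition count holding only the prefix lengths m in [p, p+n-k] that leave room for the remaining nonempty parts.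
-- outside the precondition, e.g. on min_changes_to_palindrome_partitions('', 1): A returns 0, B raises IndexError
import Mathlib
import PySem

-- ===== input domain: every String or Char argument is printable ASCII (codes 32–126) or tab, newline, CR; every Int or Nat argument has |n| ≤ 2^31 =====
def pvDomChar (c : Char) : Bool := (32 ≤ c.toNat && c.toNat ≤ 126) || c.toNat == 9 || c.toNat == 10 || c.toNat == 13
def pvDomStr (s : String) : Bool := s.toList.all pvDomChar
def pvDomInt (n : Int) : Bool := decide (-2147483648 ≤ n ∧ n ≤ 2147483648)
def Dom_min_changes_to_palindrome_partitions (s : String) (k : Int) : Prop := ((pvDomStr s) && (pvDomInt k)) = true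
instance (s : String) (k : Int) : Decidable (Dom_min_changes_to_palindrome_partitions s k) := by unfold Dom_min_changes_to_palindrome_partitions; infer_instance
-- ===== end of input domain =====

-- B replaces A's lru_cache memoized recursion by an iterative bottom-up DP (cost rows, then a
-- rolling array per partition count); same values, no recursion/cache overhead.

-- ===== PORT A =====
-- cnt(left, right): on every call A makes inside Pre_ the indices are 0 ≤ left ≤ right < len(s),
-- so Nat indices with List.getD are exact there (Python raises only out of range, outside Pre_).
def cntA (cs : List Char) (l r : Nat) : Int :=
  if _h : l ≥ r then 0
  else cntA cs (l + 1) (r - 1) + (if cs.getD l ' ' ≠ cs.getD r ' ' then 1 else 0)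
termination_by r - l
decreasing_by omega

-- dp(length, partition); the `p ≤ 1` branch (only p = 0 reaches it) is a totality guard:
-- inside Pre_ every call has partition ≥ 1, exactly as in A.
def dpA (cs : List Char) (m p : Nat) : Int :=
  if p = m then 0
  else if p = 1 then cntA cs 0 (m - 1)
  else if _hp : p ≤ 1 then 0
  else (PySem.List.min? ((List.range' (p - 1) (m - (p - 1))).map
          (fun t => dpA cs t (p - 1) + cntA cs t (m - 1))) (fun x => x)).getD 0
termination_by p
decreasing_by omega

-- min(...) of an empty generator raises ValueError in Python (outside Pre_); .getD 0 is unreachable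
-- inside Pre_.  k.toNat is exact since Pre_ gives k ≥ 1 on this branch.
def min_changes_to_palindrome_partitions (s : String) (k : Int) : Int :=
  let n := s.length
  if (n : Int) = k then 0 else dpA s.toList n k.toNat

-- ===== PORT B =====
-- row i of the cost table: [0]*(i+1) ++ [ (s[i]!=s[j]) + (prev_row[j-1] if j > i+1 else 0) for j in range(i+1, n) ]
def rowB (cs : List Char) (n i : Nat) (prevRow : List Int) : List Int :=
  List.replicate (i + 1) 0 ++
    (List.range' (i + 1) (n - (i + 1))).map
      (fun j => (if cs.getD i ' ' ≠ cs.getD j ' ' then 1 else 0) +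
                (if i + 1 < j then prevRow.getD (j - 1) 0 else 0))

-- the `for i in range(n-1, -1, -1): ... cost.insert(0, row); prev_row = row` loop, i counting down
def costGo (cs : List Char) (n : Nat) : Nat → List (List Int) → List Int → List (List Int)
  | 0, acc, _ => acc
  | i + 1, acc, prevRow =>
      let row := rowB cs n i prevRow
      costGo cs n i (row :: acc) row

-- one iteration of the partition loop: the comprehension over m in range(p, n-k+p+1), i.e. the
-- r+1 values m = p .. p+r with r = n-k (inside Pre_, where n ≥ k ≥ 1, Nat arithmetic is exact);
-- the Python index t-p+1 equals t-(p-1) on every admitted input (t ≥ p-1 ≥ 0), written so in Nat.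
def stepB (cost : List (List Int)) (r : Nat) (prev : List Int) (p : Nat) : List Int :=
  (List.range' p (r + 1)).map (fun m =>
    (PySem.List.min? ((List.range' (p - 1) (m - (p - 1))).map
      (fun t => prev.getD (t - (p - 1)) 0 + (cost.getD t []).getD (m - 1) 0)) (fun x => x)).getD 0)

def min_changes_to_palindrome_partitions_alt (s : String) (k : Int) : Int :=
  let n := s.length
  if (n : Int) = k then 0
  else
    let cs := s.toList
    let cost := costGo cs n n [] (List.replicate n 0)
    let r := n - k.toNat
    let prev1 := (List.range' 1 (r + 1)).map (fun m => (cost.getD 0 []).getD (m - 1) 0)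
    let fin := (PySem.List.pyRange 2 (k + 1) 1).foldl (fun prev p => stepB cost r prev p.toNat) prev1
    fin.getD r 0

-- ===== PRECONDITION & SPEC =====
-- Pre_ admits 1 ≤ k ≤ len(s) and the trivial case k = len(s) (incl. "" with k = 0).  Outside it A
-- raises (ValueError from min() for k > n, IndexError from negative indexing for k ≤ 0) — except the
-- single degenerate input ("", 1), excluded because A's 0 there is an accident of its cnt base case
-- firing before any indexing, while B (whose final prev[n-1] lookup needs a nonempty string) raises
-- IndexError there.
def Pre_min_changes_to_palindrome_partitions (s : String) (k : Int) : Prop :=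
  (1 ≤ k ∧ k ≤ (s.length : Int)) ∨ (s.length : Int) = k
instance (s : String) (k : Int) : Decidable (Pre_min_changes_to_palindrome_partitions s k) := by
  unfold Pre_min_changes_to_palindrome_partitions; infer_instance

def pvWitness_min_changes_to_palindrome_partitions : String × Int := ("ab", 1)

def Spec_min_changes_to_palindrome_partitions (s : String) (k : Int) (out : Int) : Prop := out = min_changes_to_palindrome_partitions_alt s k
instance (s : String) (k : Int) (out : Int) : Decidable (Spec_min_changes_to_palindrome_partitions s k out) := by unfold Spec_min_changes_to_palindrome_partitions; infer_instance

-- ===== CLAIM (what is proved, stated in full; the proofs are below) =====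
def Claim_equal_min_changes_to_palindrome_partitions : Prop := ∀ (s : String) (k : Int), Dom_min_changes_to_palindrome_partitions s k → Pre_min_changes_to_palindrome_partitions s k → Spec_min_changes_to_palindrome_partitions s k (min_changes_to_palindrome_partitions s k)

-- ===== LEMMAS AND PROOFS =====

-- invariant on a cost row: positions j ≥ i hold cnt(i, j)
def RowInv (cs : List Char) (n i : Nat) (row : List Int) : Prop :=
  ∀ j, i ≤ j → j < n → row.getD j 0 = cntA cs i j

-- invariant on a dp array: position m - q holds dp(m, q), for q ≤ m ≤ min (q + r) n
def DpInv (cs : List Char) (n r q : Nat) (prev : List Int) : Prop :=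
  ∀ m, q ≤ m → m ≤ q + r → m ≤ n → prev.getD (m - q) 0 = dpA cs m q

theorem cntA_base (cs : List Char) (l r : Nat) (h : r ≤ l) : cntA cs l r = 0 := by
  rw [cntA, dif_pos h]

theorem cntA_refl (cs : List Char) (l : Nat) : cntA cs l l = 0 :=
  cntA_base cs l l (le_refl l)

theorem dpA_refl (cs : List Char) (m : Nat) : dpA cs m m = 0 := by
  rw [dpA]; simp

theorem getD_map_range' (f : Nat → Int) (a len j : Nat) (hj : j < len) :
    ((List.range' a len).map f).getD j 0 = f (a + j) := by
  simp [List.getD_eq_getElem?_getD, hj]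

theorem rowB_inv (cs : List Char) (n i : Nat) (prevRow : List Int)
    (hprev : RowInv cs n (i + 1) prevRow) : RowInv cs n i (rowB cs n i prevRow) := by
  intro j hij hjn
  unfold rowB
  by_cases hj : j < i + 1
  · have hji : j = i := by omega
    subst hji
    rw [List.getD_append _ _ _ _ (by simp)]
    simp [cntA_refl]
  · have hji : i + 1 ≤ j := by omega
    rw [List.getD_append_right _ _ _ _ (by simp only [List.length_replicate]; omega)]
    simp only [List.length_replicate]
    rw [getD_map_range' _ _ _ _ (by omega)]
    have hidx : i + 1 + (j - (i + 1)) = j := by omega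
    rw [hidx]
    rw [cntA, dif_neg (by omega : ¬ i ≥ j)]
    by_cases hgt : i + 1 < j
    · rw [if_pos hgt, hprev (j - 1) (by omega) (by omega)]
      ring
    · have hj1 : j = i + 1 := by omega
      subst hj1
      rw [if_neg (by omega : ¬ i + 1 < i + 1), cntA_base cs (i + 1) (i + 1 - 1) (by omega)]
      ring

theorem costGo_append (cs : List Char) (n : Nat) (i : Nat) (acc : List (List Int)) (prevRow : List Int) :
    costGo cs n i acc prevRow = costGo cs n i [] prevRow ++ acc := by
  induction i generalizing acc prevRow with
  | zero => simp [costGo]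
  | succ i ih =>
      rw [costGo, costGo]
      rw [ih, ih (acc := [rowB cs n i prevRow])]
      simp

theorem costGo_length (cs : List Char) (n : Nat) (i : Nat) (prevRow : List Int) :
    (costGo cs n i [] prevRow).length = i := by
  induction i generalizing prevRow with
  | zero => simp [costGo]
  | succ i ih =>
      rw [costGo, costGo_append]
      simp [ih]

theorem costGo_spec (cs : List Char) (n : Nat) (i : Nat) (prevRow : List Int)
    (hprev : RowInv cs n i prevRow) :
    ∀ i' j, i' < i → i' ≤ j → j < n →
      ((costGo cs n i [] prevRow).getD i' []).getD j 0 = cntA cs i' j := by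
  induction i generalizing prevRow with
  | zero => intro i' j h; omega
  | succ i ih =>
      intro i' j hi' hij hjn
      rw [costGo, costGo_append]
      have hrow : RowInv cs n i (rowB cs n i prevRow) := rowB_inv cs n i prevRow hprev
      by_cases hlt : i' < i
      · rw [List.getD_append _ _ _ _ (by rw [costGo_length]; exact hlt)]
        exact ih (rowB cs n i prevRow) hrow i' j hlt hij hjn
      · have : i' = i := by omega
        subst this
        rw [List.getD_append_right _ _ _ _ (by rw [costGo_length])]
        rw [costGo_length]
        simp only [Nat.sub_self]
        exact hrow j hij hjn

-- the full cost table matches A's cnt on all in-range pairs i ≤ j < n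
theorem cost_spec (cs : List Char) (n : Nat) (hn : n = cs.length) :
    ∀ i j, i ≤ j → j < n →
      ((costGo cs n n [] (List.replicate n 0)).getD i []).getD j 0 = cntA cs i j := by
  intro i j hij hjn
  exact costGo_spec cs n n (List.replicate n 0) (fun j h1 h2 => by omega) i j (by omega) hij hjn

theorem prev1_inv (cs : List Char) (n r : Nat) (hn : n = cs.length) :
    DpInv cs n r 1 ((List.range' 1 (r + 1)).map
      (fun m => ((costGo cs n n [] (List.replicate n 0)).getD 0 []).getD (m - 1) 0)) := by
  intro m h1m hmr hmn
  rw [getD_map_range' _ _ _ _ (by omega)]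
  have hidx : 1 + (m - 1) = m := by omega
  rw [hidx, cost_spec cs n hn 0 (m - 1) (by omega) (by omega)]
  rw [dpA]
  by_cases hm : 1 = m
  · subst hm; simp [cntA_refl]
  · rw [if_neg hm]; simp

theorem stepB_inv (cs : List Char) (n r q : Nat) (hn : n = cs.length) (hq : 1 ≤ q)
    (prev : List Int) (hprev : DpInv cs n r q prev) :
    DpInv cs n r (q + 1) (stepB (costGo cs n n [] (List.replicate n 0)) r prev (q + 1)) := by
  intro m hqm hmr hmn
  unfold stepB
  rw [getD_map_range' _ _ _ _ (by omega)]
  have hidx : q + 1 + (m - (q + 1)) = m := by omega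
  rw [hidx]
  have hmap : (List.range' (q + 1 - 1) (m - (q + 1 - 1))).map
        (fun t => prev.getD (t - (q + 1 - 1)) 0 +
          ((costGo cs n n [] (List.replicate n 0)).getD t []).getD (m - 1) 0)
      = (List.range' (q + 1 - 1) (m - (q + 1 - 1))).map
        (fun t => dpA cs t q + cntA cs t (m - 1)) := by
    apply List.map_congr_left
    intro t ht
    have htmem := List.mem_range'_1.mp ht
    have h1 : q ≤ t := by omega
    have h2 : t < m := by omega
    rw [show t - (q + 1 - 1) = t - q from by omega, hprev t h1 (by omega) (by omega),
      cost_spec cs n hn t (m - 1) (by omega) (by omega)]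
  rw [hmap]
  by_cases hm : q + 1 = m
  · subst hm
    have : q + 1 - 1 = q := by omega
    rw [this]
    have : q + 1 - q = 1 := by omega
    rw [this]
    simp [List.range', dpA_refl, cntA_refl, PySem.List.min?]
  · rw [dpA, if_neg hm, if_neg (by omega : ¬ q + 1 = 1), dif_neg (by omega : ¬ q + 1 ≤ 1)]
    simp only [Nat.add_sub_cancel]

theorem fold_inv (cs : List Char) (n r : Nat) (hn : n = cs.length) (prev1 : List Int)
    (h1 : DpInv cs n r 1 prev1) (j : Nat) :
    DpInv cs n r (1 + j)
      ((PySem.List.pyRange 2 (2 + (j : Int)) 1).foldl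
        (fun prev p => stepB (costGo cs n n [] (List.replicate n 0)) r prev p.toNat) prev1) := by
  induction j with
  | zero =>
      rw [PySem.List.pyRange_one_eq_nil (by omega)]
      simpa using h1
  | succ j ih =>
      have hsplit : (2 + ((j : Int) + 1)) = (2 + (j : Int)) + 1 := by ring
      rw [show ((j + 1 : Nat) : Int) = (j : Int) + 1 by push_cast; ring, hsplit,
        PySem.List.pyRange_one_succ_right (by omega), List.foldl_append]
      simp only [List.foldl_cons, List.foldl_nil]
      have htn : (2 + (j : Int)).toNat = (1 + j) + 1 := by omega
      rw [htn]
      have := stepB_inv cs n r (1 + j) hn (by omega) _ ih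
      simpa [Nat.add_comm] using this

-- ===== VERDICT (by name: the statement is the Claim_ definition above) =====
theorem min_changes_to_palindrome_partitions_spec : Claim_equal_min_changes_to_palindrome_partitions := by
  intro s k _hdom hpre
  unfold Spec_min_changes_to_palindrome_partitions
  unfold min_changes_to_palindrome_partitions min_changes_to_palindrome_partitions_alt
  simp only []
  by_cases hk : (s.length : Int) = k
  · rw [if_pos hk, if_pos hk]
  · rw [if_neg hk, if_neg hk]
    rcases hpre with ⟨hk1, hkn⟩ | heq
    · have hklt : k < (s.length : Int) := lt_of_le_of_ne hkn (fun h => hk h.symm)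
      set n := s.length with hn
      set cs := s.toList with hcs
      have hncs : n = cs.length := by simp [hn, hcs]
      have hk0 : 1 ≤ k.toNat := by omega
      have hfold := fold_inv cs n (n - k.toNat) hncs _ (prev1_inv cs n (n - k.toNat) hncs) (k.toNat - 1)
      have hrange : (2 + ((k.toNat - 1 : Nat) : Int)) = k + 1 := by omega
      rw [hrange] at hfold
      have hq : 1 + (k.toNat - 1) = k.toNat := by omega
      rw [hq] at hfold
      exact (hfold n (by omega) (by omega) (le_refl n)).symm
    · exact absurd heq hk
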